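-- pv_equiv track=rewrite | github.com/nduong2000/aet-rag | v5/test_field_defs.py | find_field_by_name
-- ===== SOURCE A (Python) =====
-- def clean_field_name(field_name):
--     """Clean up field name for better matching"""
--     if not field_name:
--         return ""
--
--     # Convert to lowercase and strip whitespace
--     field_name = field_name.lower().strip()
--
--     # Remove prefixes like "explain", "what is", etc.
--     prefixes_to_remove = ["explain ", "what is ", "tell me about ", "describe "]
--     for prefix in prefixes_to_remove:
--         if field_name.startswith(prefix):
--             field_name = field_name[len(prefix):].strip()
--             break
--
--     # Remove trailing punctuation
--     if field_name.endswith((':', '?', '.')):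
--         field_name = field_name[:-1].strip()
--
--     return field_name
--
-- def find_field_by_name(field_definitions, field_name):
--     """Find a field ID by name or description"""
--     cleaned_name = clean_field_name(field_name)
--
--     # Direct field ID lookup
--     if cleaned_name.isdigit() and cleaned_name in field_definitions:
--         return cleaned_name
--
--     # Look for exact title match
--     for field_id, field_data in field_definitions.items():
--         title = field_data.get("title", "").lower().rstrip(':')
--         if cleaned_name == title:
--             return field_id
--
--     # Look for partial match
--     for field_id, field_data in field_definitions.items():
--         title = field_data.get("title", "").lower().rstrip(':')
--         if cleaned_name in title:
--             return field_id
--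
--     return None
-- ===== SOURCE B (Python) =====
-- def clean_field_name(field_name):
--     """Clean up field name for better matching"""
--     if not field_name:
--         return ""
--     field_name = field_name.lower().strip()
--     prefixes_to_remove = ["explain ", "what is ", "tell me about ", "describe "]
--     for prefix in prefixes_to_remove:
--         if field_name.startswith(prefix):
--             field_name = field_name[len(prefix):].strip()
--             break
--     if field_name.endswith((':', '?', '.')):
--         field_name = field_name[:-1].strip()
--     return field_name
--
-- def find_field_by_name(field_definitions, field_name):
--     """Find a field ID by name or description (rank-and-select: score each
--     entry 0 for an exact title match, 1 for a substring match, keep the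
--     minimum by (score, position))."""
--     cleaned_name = clean_field_name(field_name)
--     if cleaned_name.isdigit() and cleaned_name in field_definitions:
--         return cleaned_name
--     best = None  # (score, index, field_id)
--     for i, (field_id, field_data) in enumerate(field_definitions.items()):
--         title = field_data.get("title", "").lower().rstrip(':')
--         if cleaned_name == title:
--             score = 0
--         elif cleaned_name in title:
--             score = 1
--         else:
--             continue
--         if best is None or (score, i) < (best[0], best[1]):
--             best = (score, i, field_id)
--     return best[2] if best is not None else None
-- ===== Notes on version B (the rewrite author's own statement) =====
-- stated objective: alternative
-- what changed: A's two staged scans (exact-title pass, then partial-substring pass) are replaced by a rank-and-select single loop that scores each entry (0 = exact, 1 = substring) and keeps the minimum candidate by (score, position), returning its field id at the end.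
import Mathlib
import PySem

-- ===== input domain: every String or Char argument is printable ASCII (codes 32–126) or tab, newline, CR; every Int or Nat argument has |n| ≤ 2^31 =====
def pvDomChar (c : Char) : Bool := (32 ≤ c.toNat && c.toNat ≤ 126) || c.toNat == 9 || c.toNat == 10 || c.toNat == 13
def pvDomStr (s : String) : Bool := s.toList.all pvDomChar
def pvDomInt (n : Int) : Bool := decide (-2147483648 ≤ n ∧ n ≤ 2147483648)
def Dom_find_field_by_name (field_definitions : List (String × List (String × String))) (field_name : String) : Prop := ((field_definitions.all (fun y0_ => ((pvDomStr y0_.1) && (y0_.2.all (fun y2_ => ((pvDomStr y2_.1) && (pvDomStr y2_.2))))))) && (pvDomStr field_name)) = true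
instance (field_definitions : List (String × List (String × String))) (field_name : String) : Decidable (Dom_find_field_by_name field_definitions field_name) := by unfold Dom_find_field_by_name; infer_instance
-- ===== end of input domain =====

-- ===== PORT A =====
-- B replaces A's two staged scans by one rank-and-select loop (alternative, same cost);
-- the cleaning helper is shared code in both Pythons.
-- .rstrip(':') has no PySem primitive with a chars argument: pvRstripColon drops trailing ':' chars by hand (exact for this one-char case).
def pvRstripColon (s : String) : String :=
  String.ofList ((s.toList.reverse.dropWhile (fun c => c == ':')).reverse)

-- field_data.get("title", "").lower().rstrip(':')  (inner dict read through Python dict semantics)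
def pvTitle (field_data : List (String × String)) : String :=
  pvRstripColon (PySem.Str.lower ((PySem.Dict.ofList field_data).getD "title" ""))

-- loop over prefixes_to_remove with break
def pvRemovePrefix : List String → String → String
  | [], f => f
  | p :: ps, f =>
    if PySem.Str.startswith f p then PySem.Str.strip (PySem.Str.slice f (some (PySem.Str.len p)) none)
    else pvRemovePrefix ps f

def clean_field_name (field_name : String) : String :=
  if field_name == "" then ""
  else
    let f := PySem.Str.strip (PySem.Str.lower field_name)
    let f := pvRemovePrefix ["explain ", "what is ", "tell me about ", "describe "] f
    if PySem.Str.endswith f ":" || PySem.Str.endswith f "?" || PySem.Str.endswith f "." then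
      PySem.Str.strip (PySem.Str.slice f none (some (-1)))
    else f

-- first loop of A: exact title match
def pvExactLoop (c : String) : List (String × List (String × String)) → Option String
  | [] => none
  | (fid, fd) :: rest => if c == pvTitle fd then some fid else pvExactLoop c rest

-- second loop of A: partial (substring) match
def pvPartialLoop (c : String) : List (String × List (String × String)) → Option String
  | [] => none
  | (fid, fd) :: rest => if PySem.Str.isIn c (pvTitle fd) then some fid else pvPartialLoop c rest

def find_field_by_name (field_definitions : List (String × List (String × String))) (field_name : String) : Option String :=
  let cleaned := clean_field_name field_name
  let d := PySem.Dict.ofList field_definitions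
  if PySem.Str.strIsdigit cleaned && d.contains cleaned then some cleaned
  else
    match pvExactLoop cleaned d.items with
    | some fid => some fid
    | none => pvPartialLoop cleaned d.items

-- ===== PORT B =====
-- B's loop over enumerate(items): score each entry (0 exact, 1 substring, skip otherwise)
-- and keep the (score, index)-lexicographically smallest as `best`.
def pvBestLoop (c : String) : Nat → Option (Nat × Nat × String) → List (String × List (String × String)) → Option (Nat × Nat × String)
  | _, best, [] => best
  | i, best, (fid, fd) :: rest =>
    let t := pvTitle fd
    let score? : Option Nat :=
      if c == t then some 0
      else if PySem.Str.isIn c t then some 1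
      else none
    let best' :=
      match score? with
      | none => best
      | some s =>
        match best with
        | none => some (s, i, fid)
        | some b => if s < b.1 || (s == b.1 && i < b.2.1) then some (s, i, fid) else best
    pvBestLoop c (i + 1) best' rest

def find_field_by_name_alt (field_definitions : List (String × List (String × String))) (field_name : String) : Option String :=
  let cleaned := clean_field_name field_name
  let d := PySem.Dict.ofList field_definitions
  if PySem.Str.strIsdigit cleaned && d.contains cleaned then some cleaned
  else
    match pvBestLoop cleaned 0 none d.items with
    | some b => some b.2.2
    | none => none

-- ===== PRECONDITION & SPEC =====
def Spec_find_field_by_name (field_definitions : List (String × List (String × String))) (field_name : String) (out : Option String) : Prop := out = find_field_by_name_alt field_definitions field_name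
instance (field_definitions : List (String × List (String × String))) (field_name : String) (out : Option String) : Decidable (Spec_find_field_by_name field_definitions field_name out) := by unfold Spec_find_field_by_name; infer_instance

-- ===== CLAIM (what is proved, stated in full; the proofs are below) =====
def Claim_equal_find_field_by_name : Prop := ∀ (field_definitions : List (String × List (String × String))) (field_name : String), Dom_find_field_by_name field_definitions field_name → Spec_find_field_by_name field_definitions field_name (find_field_by_name field_definitions field_name)

-- ===== LEMMAS AND PROOFS =====
-- Invariant of B's rank-and-select loop: only accumulators of score 0 or 1 with index < i
-- occur; a recorded exact (score 0) is final, a recorded partial (score 1) is beaten only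
-- by an exact further on, and from `none` the result is A's exact pass, then partial pass.
theorem pvBestLoop_eq (c : String) (items : List (String × List (String × String)))
    (i : Nat) (best : Option (Nat × Nat × String))
    (h : ∀ s j f, best = some (s, j, f) → j < i ∧ s ≤ 1) :
    (pvBestLoop c i best items).map (·.2.2) =
      match best with
      | some (0, _, f) => some f
      | _ =>
        match pvExactLoop c items with
        | some fid => some fid
        | none =>
          match best with
          | some (_, _, f) => some f
          | none => pvPartialLoop c items := by
  induction items generalizing i best with
  | nil =>
    match best with
    | none => simp [pvBestLoop, pvExactLoop, pvPartialLoop]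
    | some (s, j, f) =>
      have := (h s j f rfl).2
      interval_cases s <;> simp [pvBestLoop, pvExactLoop]
  | cons hd tl ih =>
    obtain ⟨fid, fd⟩ := hd
    have hpart : pvPartialLoop c ((fid, fd) :: tl) =
        if PySem.Str.isIn c (pvTitle fd) then some fid else pvPartialLoop c tl := rfl
    by_cases hex : c == pvTitle fd
    · -- current entry scores 0
      match best with
      | none =>
        rw [pvBestLoop]
        simp only [hex, if_true]
        rw [ih (i + 1) _ (by intro s j f h'; simp only [Option.some.injEq, Prod.mk.injEq] at h'; omega)]
        simp [pvExactLoop, hex]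
      | some (s, j, f) =>
        obtain ⟨hj, hs⟩ := h s j f rfl
        rw [pvBestLoop]
        simp only [hex, if_true]
        interval_cases s
        · -- recorded exact stays (0 < 0 false, 0 == 0 but i < j false)
          rw [if_neg (by simp; omega)]
          rw [ih (i + 1) _ (by intro s' j' f' h'; simp only [Option.some.injEq, Prod.mk.injEq] at h'; omega)]
        · -- recorded partial is replaced by this exact
          rw [if_pos (by simp)]
          rw [ih (i + 1) _ (by intro s' j' f' h'; simp only [Option.some.injEq, Prod.mk.injEq] at h'; omega)]
          simp [pvExactLoop, hex]
    · simp only [PySem.Str.isIn] at hpart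
      by_cases hin : PySem.Chars.isIn c.toList (pvTitle fd).toList
      · -- current entry scores 1
        match best with
        | none =>
          rw [pvBestLoop]
          simp only [PySem.Str.isIn, hex, hin, if_true, if_false, Bool.false_eq_true]
          rw [ih (i + 1) _ (by intro s j f h'; simp only [Option.some.injEq, Prod.mk.injEq] at h'; omega)]
          simp only [pvExactLoop, hex, if_false, Bool.false_eq_true, hpart, hin, if_true]
        | some (s, j, f) =>
          obtain ⟨hj, hs⟩ := h s j f rfl
          rw [pvBestLoop]
          simp only [PySem.Str.isIn, hex, hin, if_true, if_false, Bool.false_eq_true]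
          rw [if_neg (by simp; omega)]
          rw [ih (i + 1) _ (by intro s' j' f' h'; simp only [Option.some.injEq, Prod.mk.injEq] at h'; omega)]
          interval_cases s <;> simp [pvExactLoop, hex]
      · -- current entry skipped
        have hacc : ∀ s j f, best = some (s, j, f) → j < i + 1 ∧ s ≤ 1 := by
          intro s j f h'; have := h s j f h'; omega
        rw [pvBestLoop]
        simp only [PySem.Str.isIn, hex, hin, if_false, Bool.false_eq_true]
        rw [ih (i + 1) _ hacc]
        have hEx : pvExactLoop c ((fid, fd) :: tl) = pvExactLoop c tl := by
          simp [pvExactLoop, hex]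
        match best with
        | none =>
          simp only [hEx, hpart, hin, if_false, Bool.false_eq_true]
        | some (s, j, f) =>
          obtain ⟨hj, hs⟩ := h s j f rfl
          interval_cases s <;> simp only [hEx]

-- ===== VERDICT (by name: the statement is the Claim_ definition above) =====
theorem find_field_by_name_spec : Claim_equal_find_field_by_name := by
  intro fds name _
  unfold Spec_find_field_by_name find_field_by_name find_field_by_name_alt
  simp only
  split
  · rfl
  · have := pvBestLoop_eq (clean_field_name name) (PySem.Dict.ofList fds).items 0 none
      (by rintro s j f h'; cases h')
    simp only at this
    cases hb : pvBestLoop (clean_field_name name) 0 none (PySem.Dict.ofList fds).items <;>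
      rw [hb] at this <;> simp at this <;>
      cases he : pvExactLoop (clean_field_name name) (PySem.Dict.ofList fds).items <;>
      rw [he] at this <;> simp_all
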